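-- pv_equiv track=rewrite | github.com/Focuslow/FB-messages | words_used.py | limit_time
-- ===== SOURCE A (Python) =====
-- def limit_time(msgs, timedown, timeup):
--     out = []
--     for k in msgs:
--         if timedown == 0 and timeup == 0:
--             out.append(k[0])
--
--         elif timedown == 0 and timeup !=0:
--             if k[1] <= timeup:
--                 out.append(k[0])
--
--         elif timeup == 0 and timedown !=0:
--             if k[1] >= timedown:
--                 out.append(k[0])
--
--         elif k[1] <= timeup and k[1] >= timedown:
--             out.append(k[0])
--
--     return out
-- ===== SOURCE B (Python) =====
-- def limit_time(msgs, timedown, timeup):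
--     kept = msgs
--     if timedown != 0:
--         kept = [k for k in kept if k[1] >= timedown]
--     if timeup != 0:
--         kept = [k for k in kept if k[1] <= timeup]
--     return [k[0] for k in kept]
-- ===== Notes on version B (the rewrite author's own statement) =====
-- stated objective: simpler
-- what changed: Replaces A's single accumulator loop with a four-way branch per element by staged passes: an optional lower-bound filter pass, an optional upper-bound filter pass, and a final projection pass; each 0-sentinel decision is made once per pass, not per element.
import Mathlib
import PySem

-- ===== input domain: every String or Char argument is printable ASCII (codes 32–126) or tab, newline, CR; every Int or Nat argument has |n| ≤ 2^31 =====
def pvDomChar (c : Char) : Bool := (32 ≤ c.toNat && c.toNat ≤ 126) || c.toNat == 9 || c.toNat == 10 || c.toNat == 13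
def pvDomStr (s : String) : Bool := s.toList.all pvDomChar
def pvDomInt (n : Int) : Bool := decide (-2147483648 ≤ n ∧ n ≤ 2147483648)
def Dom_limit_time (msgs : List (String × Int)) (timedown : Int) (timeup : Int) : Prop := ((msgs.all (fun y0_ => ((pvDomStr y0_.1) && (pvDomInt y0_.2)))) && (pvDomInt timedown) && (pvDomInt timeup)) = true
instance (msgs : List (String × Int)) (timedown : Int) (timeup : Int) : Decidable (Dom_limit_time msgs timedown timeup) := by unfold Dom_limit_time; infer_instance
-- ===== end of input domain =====

-- B replaces A's per-element four-way branch loop by staged passes (optional lower-bound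
-- filter, optional upper-bound filter, projection): a simpler decomposition, same cost.

-- ===== PORT A =====
-- literal transliteration of A's accumulator loop with its four-way branch
def limit_time (msgs : List (String × Int)) (timedown : Int) (timeup : Int) : List String :=
  msgs.foldl (fun out k =>
    if timedown = 0 ∧ timeup = 0 then out ++ [k.1]
    else if timedown = 0 ∧ timeup ≠ 0 then
      (if k.2 ≤ timeup then out ++ [k.1] else out)
    else if timeup = 0 ∧ timedown ≠ 0 then
      (if k.2 ≥ timedown then out ++ [k.1] else out)
    else if k.2 ≤ timeup ∧ k.2 ≥ timedown then out ++ [k.1] else out) []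

-- ===== PORT B =====
-- staged passes: optional lower-bound filter, optional upper-bound filter, then projection
def limit_time_alt (msgs : List (String × Int)) (timedown : Int) (timeup : Int) : List String :=
  let kept1 := if timedown ≠ 0 then msgs.filter (fun k => timedown ≤ k.2) else msgs
  let kept2 := if timeup ≠ 0 then kept1.filter (fun k => k.2 ≤ timeup) else kept1
  kept2.map Prod.fst

-- ===== PRECONDITION & SPEC =====
def Spec_limit_time (msgs : List (String × Int)) (timedown : Int) (timeup : Int) (out : List String) : Prop := out = limit_time_alt msgs timedown timeup
instance (msgs : List (String × Int)) (timedown : Int) (timeup : Int) (out : List String) : Decidable (Spec_limit_time msgs timedown timeup out) := by unfold Spec_limit_time; infer_instance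

-- ===== CLAIM (what is proved, stated in full; the proofs are below) =====
def Claim_equal_limit_time : Prop := ∀ (msgs : List (String × Int)) (timedown : Int) (timeup : Int), Dom_limit_time msgs timedown timeup → Spec_limit_time msgs timedown timeup (limit_time msgs timedown timeup)

-- ===== LEMMAS AND PROOFS =====

-- the combined per-element condition both programs realise
def pvKeep (timedown timeup : Int) (k : String × Int) : Bool :=
  (timedown == 0 || timedown ≤ k.2) && (timeup == 0 || k.2 ≤ timeup)

def pvStepA (timedown timeup : Int) (out : List String) (k : String × Int) : List String :=
  if timedown = 0 ∧ timeup = 0 then out ++ [k.1]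
  else if timedown = 0 ∧ timeup ≠ 0 then
    (if k.2 ≤ timeup then out ++ [k.1] else out)
  else if timeup = 0 ∧ timedown ≠ 0 then
    (if k.2 ≥ timedown then out ++ [k.1] else out)
  else if k.2 ≤ timeup ∧ k.2 ≥ timedown then out ++ [k.1] else out

theorem pvStepA_eq (timedown timeup : Int) (out : List String) (k : String × Int) :
    pvStepA timedown timeup out k
      = out ++ (if pvKeep timedown timeup k then [k.1] else []) := by
  unfold pvStepA pvKeep
  by_cases hd : timedown = 0 <;> by_cases hu : timeup = 0 <;>
    by_cases h1 : timedown ≤ k.2 <;> by_cases h2 : k.2 ≤ timeup <;>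
      simp [hd, hu, h1, h2, ge_iff_le]

theorem limit_time_alt_eq_filter (msgs : List (String × Int)) (timedown timeup : Int) :
    limit_time_alt msgs timedown timeup
      = (msgs.filter (pvKeep timedown timeup)).map Prod.fst := by
  unfold limit_time_alt pvKeep
  by_cases hd : timedown = 0 <;> by_cases hu : timeup = 0
  · simp [hd, hu]
  · have hu' : (timeup == 0) = false := by simp [hu]
    simp [hd, hu, hu']
  · have hd' : (timedown == 0) = false := by simp [hd]
    simp [hd, hu, hd']
  · have hd' : (timedown == 0) = false := by simp [hd]
    have hu' : (timeup == 0) = false := by simp [hu]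
    simp [hd, hu, hd', hu', List.filter_filter, Bool.and_comm]

theorem limit_time_foldl_acc (msgs : List (String × Int)) (timedown timeup : Int)
    (acc : List String) :
    msgs.foldl (pvStepA timedown timeup) acc
    = acc ++ (msgs.filter (pvKeep timedown timeup)).map Prod.fst := by
  induction msgs generalizing acc with
  | nil => simp
  | cons k rest ih =>
    rw [List.foldl_cons, pvStepA_eq, ih]
    cases hp : pvKeep timedown timeup k <;> simp [hp]

-- ===== VERDICT (by name: the statement is the Claim_ definition above) =====
theorem limit_time_spec : Claim_equal_limit_time := by
  intro msgs timedown timeup _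
  unfold Spec_limit_time limit_time
  rw [limit_time_alt_eq_filter]
  simpa [pvStepA] using limit_time_foldl_acc msgs timedown timeup []
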